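-- pv_equiv track=rewrite | github.com/silverjjj/algorithm | Programmers/문자열압축.py | find
-- ===== SOURCE A (Python) =====
-- def find(s ,k ,i):
--     arr = []
--     char = s[:i]
--     cnt = 1
--     for j in range(i,k,i):
--         if char == s[j:j+i]:
--             cnt += 1
--         else:
--             arr.append([cnt, char])
--             char = s[j:j+i]
--             cnt = 1
--     arr.append([cnt, char])
--     res = 0
--     for num, chars in arr:
--         res += len(chars)
--         if num != 1:
--             res += len(str(num))
--     return res
-- ===== SOURCE B (Python) =====
-- def find(s, k, i):
--     # Materialize the chunk sequence once, then sum run-lengths recursively.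
--     chunks = [s[:i]] + [s[j:j+i] for j in range(i, k, i)]
--     def cost(cs):
--         if not cs:
--             return 0
--         run = 1
--         while run < len(cs) and cs[run] == cs[0]:
--             run += 1
--         return len(cs[0]) + (len(str(run)) if run != 1 else 0) + cost(cs[run:])
--     return cost(chunks)
-- ===== Notes on version B (the rewrite author's own statement) =====
-- stated objective: alternative
-- what changed: B materializes the chunk list once and computes the total by a recursive run-length scan (group-at-a-time with a fused sum), instead of A's single accumulator loop that builds an intermediate [count, chunk] list followed by a second summation pass.
import Mathlib
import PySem

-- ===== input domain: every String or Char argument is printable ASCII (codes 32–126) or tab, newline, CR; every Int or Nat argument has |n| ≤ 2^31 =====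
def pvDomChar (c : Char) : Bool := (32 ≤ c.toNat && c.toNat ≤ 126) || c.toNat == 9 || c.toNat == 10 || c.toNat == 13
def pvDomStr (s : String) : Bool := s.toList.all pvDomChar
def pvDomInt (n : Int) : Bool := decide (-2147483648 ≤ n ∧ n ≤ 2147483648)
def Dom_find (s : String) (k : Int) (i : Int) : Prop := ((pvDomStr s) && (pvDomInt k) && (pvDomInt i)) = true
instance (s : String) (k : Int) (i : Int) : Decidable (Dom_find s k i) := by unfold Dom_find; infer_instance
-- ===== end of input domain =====

-- B materializes the chunk list and sums runs by structural recursion; A keeps a running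
-- (char, cnt) accumulator building an intermediate list, then sums it in a second pass.

-- ===== PORT A =====
-- literal transliteration: arr/char/cnt loop over range(i,k,i), then the summation loop
def find (s : String) (k : Int) (i : Int) : Int :=
  let sl := s.toList
  let st := (PySem.List.pyRange i k i).foldl
    (fun (st : List (Int × List Char) × List Char × Int) j =>
      let arr := st.1; let char := st.2.1; let cnt := st.2.2
      if char = PySem.List.slice sl (some j) (some (j + i)) then
        (arr, char, cnt + 1)
      else
        (arr ++ [(cnt, char)], PySem.List.slice sl (some j) (some (j + i)), 1))
    ([], PySem.List.slice sl none (some i), 1)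
  let arr := st.1 ++ [(st.2.2, st.2.1)]
  arr.foldl (fun res p =>
    let res := res + (p.2.length : Int)
    if p.1 ≠ 1 then res + ((PySem.Int.toChars p.1).length : Int) else res) 0

-- ===== PORT B =====
-- B's recursive run-length cost over the materialized chunk list
def findCost : List (List Char) → Int
  | [] => 0
  | c :: rest =>
      let run : Nat := (rest.takeWhile (fun x => x == c)).length + 1
      (c.length : Int)
        + (if (run : Int) ≠ 1 then (((PySem.Int.toChars (run : Int)).length : Int)) else 0)
        + findCost (rest.drop (run - 1))
termination_by cs => cs.length
decreasing_by
  simp only [List.length_cons, List.length_drop]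
  omega

def find_alt (s : String) (k : Int) (i : Int) : Int :=
  let sl := s.toList
  findCost (PySem.List.slice sl none (some i) ::
    (PySem.List.pyRange i k i).map (fun j => PySem.List.slice sl (some j) (some (j + i))))

-- ===== PRECONDITION & SPEC =====
-- Pre_find excludes only i = 0, where Python A raises ValueError (range() step must not be 0).
def Pre_find (_s : String) (_k : Int) (i : Int) : Prop := i ≠ 0
instance (s : String) (k : Int) (i : Int) : Decidable (Pre_find s k i) := by unfold Pre_find; infer_instance
def pvWitness_find : String × Int × Int := ("aabbaccc", 8, 2)

def Spec_find (s : String) (k : Int) (i : Int) (out : Int) : Prop := out = find_alt s k i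
instance (s : String) (k : Int) (i : Int) (out : Int) : Decidable (Spec_find s k i out) := by unfold Spec_find; infer_instance

-- ===== CLAIM (what is proved, stated in full; the proofs are below) =====
def Claim_equal_find : Prop := ∀ (s : String) (k : Int) (i : Int), Dom_find s k i → Pre_find s k i → Spec_find s k i (find s k i)

-- ===== LEMMAS AND PROOFS =====

-- cost of one [cnt, char] entry in A's summation pass
def pvEntry (cnt : Int) (char : List Char) : Int :=
  (char.length : Int) + (if cnt ≠ 1 then ((PySem.Int.toChars cnt).length : Int) else 0)

-- A's compare-and-count loop step, over the chunk list itself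
def pvStepA (st : List (Int × List Char) × List Char × Int) (c : List Char) :
    List (Int × List Char) × List Char × Int :=
  if st.2.1 = c then (st.1, st.2.1, st.2.2 + 1) else (st.1 ++ [(st.2.2, st.2.1)], c, 1)

-- cost contributed by A's pending (char, cnt) state followed by the rest of the chunks
def pvPend (char : List Char) (cnt : Int) : List (List Char) → Int
  | [] => pvEntry cnt char
  | c :: t => if c = char then pvPend char (cnt + 1) t else pvEntry cnt char + pvPend c 1 t

theorem pvSum_eq (arr : List (Int × List Char)) (a : Int) :
    arr.foldl (fun res p =>
      if p.1 ≠ 1 then res + (p.2.length : Int) + ((PySem.Int.toChars p.1).length : Int)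
      else res + (p.2.length : Int)) a
      = a + (arr.map (fun p => pvEntry p.1 p.2)).sum := by
  induction arr generalizing a with
  | nil => simp
  | cons p t ih =>
      simp only [List.foldl_cons, List.map_cons, List.sum_cons, ih, pvEntry]
      split_ifs <;> ring

-- the fold of A's loop, finished off with the final append and summed, splits into
-- the entries already emitted plus the pending-run cost
theorem pvLoop_eq (cs : List (List Char)) : ∀ (arr : List (Int × List Char))
    (char : List Char) (cnt : Int),
    (((cs.foldl pvStepA (arr, char, cnt)).1
        ++ [((cs.foldl pvStepA (arr, char, cnt)).2.2,
             (cs.foldl pvStepA (arr, char, cnt)).2.1)]).map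
        (fun p => pvEntry p.1 p.2)).sum
      = (arr.map (fun p => pvEntry p.1 p.2)).sum + pvPend char cnt cs := by
  induction cs with
  | nil => intro arr char cnt; simp [pvPend]
  | cons c t ih =>
      intro arr char cnt
      by_cases h : char = c
      · subst h
        simp only [List.foldl_cons, pvStepA, pvPend]
        exact ih arr char (cnt + 1)
      · simp only [List.foldl_cons, pvStepA, if_neg h, pvPend, if_neg (Ne.symm h)]
        rw [ih (arr ++ [(cnt, char)]) c 1]
        simp [add_assoc]

-- the pending-run cost in closed form: the run absorbs the leading equal chunks
theorem pvPend_eq (cs : List (List Char)) : ∀ (char : List Char) (cnt : Int),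
    pvPend char cnt cs
      = pvEntry (cnt + ((cs.takeWhile (fun x => x == char)).length : Int)) char
        + findCost (cs.drop (cs.takeWhile (fun x => x == char)).length) := by
  induction cs with
  | nil => intro char cnt; simp [pvPend, findCost]
  | cons c t ih =>
      intro char cnt
      by_cases h : c = char
      · subst h
        simp only [pvPend, List.takeWhile_cons, beq_self_eq_true, if_true,
          List.length_cons, List.drop_succ_cons]
        rw [ih c (cnt + 1)]
        push_cast; ring_nf
      · have hb : (c == char) = false := beq_eq_false_iff_ne.mpr h
        simp only [pvPend, if_neg h, List.takeWhile_cons, hb, Bool.false_eq_true,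
          if_false, List.length_nil, Nat.cast_zero, add_zero, List.drop_zero]
        rw [ih c 1, findCost]
        have : ((t.takeWhile (fun x => x == c)).length + 1 - 1)
            = (t.takeWhile (fun x => x == c)).length := by omega
        rw [this]
        have hrun : (((t.takeWhile (fun x => x == c)).length + 1 : Nat) : Int)
            = 1 + ((t.takeWhile (fun x => x == c)).length : Int) := by push_cast; ring
        rw [hrun]
        simp [pvEntry, add_comm, add_left_comm]

-- A's loop over indices, rewritten as the same loop over the mapped chunk list
theorem pvFoldMap (fj : Int → List Char) (init : List (Int × List Char) × List Char × Int)
    (l : List Int) :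
    List.foldl (fun st j => pvStepA st (fj j)) init l
      = List.foldl pvStepA init (l.map fj) := by
  induction l generalizing init with
  | nil => rfl
  | cons x xs ih => simp only [List.foldl_cons, List.map_cons, ih]

-- findCost restarted at a fresh chunk is the pending cost with count 1
theorem findCost_cons (c : List Char) (t : List (List Char)) :
    findCost (c :: t) = pvPend c 1 t := by
  rw [pvPend_eq t c 1, findCost]
  have : ((t.takeWhile (fun x => x == c)).length + 1 - 1)
      = (t.takeWhile (fun x => x == c)).length := by omega
  rw [this]
  have hrun : (((t.takeWhile (fun x => x == c)).length + 1 : Nat) : Int)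
      = 1 + ((t.takeWhile (fun x => x == c)).length : Int) := by push_cast; ring
  rw [hrun]
  simp [pvEntry, add_comm, add_left_comm]

-- ===== VERDICT (by name: the statement is the Claim_ definition above) =====
theorem find_spec : Claim_equal_find := by
  intro s k i _ _
  unfold Spec_find find find_alt
  simp only []
  rw [show (fun (st : List (Int × List Char) × List Char × Int) (j : Int) =>
      ite (st.2.1 = PySem.List.slice s.toList (some j) (some (j + i)))
        (st.1, st.2.1, st.2.2 + 1)
        (st.1 ++ [(st.2.2, st.2.1)], PySem.List.slice s.toList (some j) (some (j + i)), 1))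
      = (fun st j => pvStepA st (PySem.List.slice s.toList (some j) (some (j + i)))) from rfl]
  rw [pvFoldMap]
  rw [pvSum_eq, pvLoop_eq, findCost_cons]
  simp
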